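-- pv_equiv track=rewrite | github.com/NicsonSUPRA/PROG1-AVAL2 | PROBLEMA1.py | M_alternates
-- ===== SOURCE A (Python) =====
-- def M_alternates(lista):
--     first_index=0
--     second_index=1
--     counting=2
--     listanova=list()
--     while(second_index <= len(lista)):
--         listanova.append(lista[first_index:second_index])
--         first_index=second_index
--         second_index+=counting
--         counting+=1
--     return listanova
-- ===== SOURCE B (Python) =====
-- def M_alternates(lista):
--     result = []
--     chunk = []
--     target = 1
--     for x in lista:
--         chunk.append(x)
--         if len(chunk) == target:
--             result.append(chunk)
--             chunk = []
--             target += 1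
--     return result
-- ===== Notes on version B (the rewrite author's own statement) =====
-- stated objective: simpler
-- what changed: B replaces A's while-loop over computed slice boundaries (first/second index + growing stride) with a single pass over the elements that fills a buffer and emits it when it reaches the growing target size, dropping any trailing partial buffer.
import Mathlib
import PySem

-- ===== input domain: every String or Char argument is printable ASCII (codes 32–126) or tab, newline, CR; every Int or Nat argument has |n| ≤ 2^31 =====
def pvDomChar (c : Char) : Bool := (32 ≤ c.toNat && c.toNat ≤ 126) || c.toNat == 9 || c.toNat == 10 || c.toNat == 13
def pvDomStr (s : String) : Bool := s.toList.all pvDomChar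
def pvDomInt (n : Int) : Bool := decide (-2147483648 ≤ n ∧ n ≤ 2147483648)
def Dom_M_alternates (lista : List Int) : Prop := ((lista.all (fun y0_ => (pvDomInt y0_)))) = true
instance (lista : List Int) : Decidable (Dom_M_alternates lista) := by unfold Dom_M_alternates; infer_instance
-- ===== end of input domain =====

-- B iterates once over the elements with a buffer and a growing target size instead of
-- computing slice boundaries; same values, simpler decomposition (no index arithmetic).

-- ===== PORT A =====
-- A's while loop: first_index/second_index/counting state, appending slices.
-- Loop-variable state kept as Nat (the Python values are provably the same nonnegative ints);
-- the hypothesis argument hc records counting ≥ 1 only for termination, it does not alter the computation.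
def M_loopA (lista : List Int) (first second counting : Nat)
    (acc : List (List Int)) (hc : 1 ≤ counting) : List (List Int) :=
  if second ≤ lista.length then
    M_loopA lista second (second + counting) (counting + 1)
      (acc ++ [PySem.List.slice lista (some (first : Int)) (some (second : Int))]) (by omega)
  else acc
termination_by lista.length + 1 - second
decreasing_by omega

def M_alternates (lista : List Int) : List (List Int) :=
  M_loopA lista 0 1 2 [] (by omega)

-- ===== PORT B =====
-- B's for loop: buffer `chunk`, target size, emit on full buffer.
def M_loopB (rest chunk : List Int) (target : Nat) (res : List (List Int)) : List (List Int) :=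
  match rest with
  | [] => res
  | x :: xs =>
    let chunk' := chunk ++ [x]
    if chunk'.length = target then M_loopB xs [] (target + 1) (res ++ [chunk'])
    else M_loopB xs chunk' target res

def M_alternates_alt (lista : List Int) : List (List Int) :=
  M_loopB lista [] 1 []

-- ===== PRECONDITION & SPEC =====
def Spec_M_alternates (lista : List Int) (out : List (List Int)) : Prop := out = M_alternates_alt lista
instance (lista : List Int) (out : List (List Int)) : Decidable (Spec_M_alternates lista out) := by unfold Spec_M_alternates; infer_instance

-- ===== CLAIM (what is proved, stated in full; the proofs are below) =====
def Claim_equal_M_alternates : Prop := ∀ (lista : List Int), Dom_M_alternates lista → Spec_M_alternates lista (M_alternates lista)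

-- ===== LEMMAS AND PROOFS =====

-- Common reference: the list of chunks of sizes n+1, n+2, … taken greedily, dropping the
-- trailing incomplete chunk.
def chunksF (rest : List Int) (n : Nat) : List (List Int) :=
  if n + 1 ≤ rest.length then
    rest.take (n + 1) :: chunksF (rest.drop (n + 1)) (n + 1)
  else []
termination_by rest.length
decreasing_by simp [List.length_drop]; omega

theorem loopA_eq_chunksF (l : List Int) : ∀ (fuel first n : Nat) (acc : List (List Int))
    (_hfuel : l.length + 1 - (first + (n + 1)) ≤ fuel),
    M_loopA l first (first + (n + 1)) (n + 2) acc (by omega) = acc ++ chunksF (l.drop first) n := by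
  intro fuel
  induction fuel with
  | zero =>
    intro first n acc _hfuel
    rw [M_loopA, chunksF]
    have hlen : (l.drop first).length = l.length - first := List.length_drop ..
    have hcond : ¬ first + (n + 1) ≤ l.length := by omega
    rw [if_neg hcond, if_neg (by omega), List.append_nil]
  | succ fuel ih =>
    intro first n acc hfuel
    rw [M_loopA, chunksF]
    have hlen : (l.drop first).length = l.length - first := List.length_drop ..
    by_cases hcond : first + (n + 1) ≤ l.length
    · rw [if_pos hcond, if_pos (by omega)]
      have hstep : first + (n + 1) + (n + 2) = (first + (n + 1)) + ((n + 1) + 1) := by omega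
      have := ih (first + (n + 1)) (n + 1)
        (acc ++ [PySem.List.slice l (some (first : Int)) (some ((first + (n + 1) : Nat) : Int))])
        (by omega)
      rw [hstep] at *
      rw [this]
      have hslice : PySem.List.slice l (some (first : Int)) (some ((first + (n + 1) : Nat) : Int))
          = (l.drop first).take (n + 1) := by
        have : ((first + (n + 1) : Nat) : Int) = (first : Int) + ((n + 1 : Nat) : Int) := by push_cast; ring
        rw [this, PySem.List.slice_natCast_add]
      rw [hslice, List.drop_drop, List.append_assoc]
      simp
    · rw [if_neg hcond, if_neg (by omega), List.append_nil]

theorem loopB_fill : ∀ (rest chunk : List Int) (target : Nat) (res : List (List Int)),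
    chunk.length < target →
    M_loopB rest chunk target res =
      if target - chunk.length ≤ rest.length then
        M_loopB (rest.drop (target - chunk.length)) [] (target + 1)
          (res ++ [chunk ++ rest.take (target - chunk.length)])
      else res := by
  intro rest
  induction rest with
  | nil =>
    intro chunk target res h
    rw [M_loopB, if_neg (by simp only [List.length_nil]; omega)]
  | cons x xs ih =>
    intro chunk target res h
    simp only [M_loopB]
    by_cases hfull : (chunk ++ [x]).length = target
    · simp only [List.length_append, List.length_cons] at hfull ⊢
      rw [if_pos (by simpa using hfull)]
      have h1 : target - chunk.length = 1 := by simp at hfull; omega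
      rw [if_pos (by simp [h1]), h1]
      simp
    · rw [if_neg hfull]
      rw [ih (chunk ++ [x]) target res (by simp at hfull ⊢; omega)]
      simp only [List.length_append, List.length_singleton] at *
      have hge : 1 ≤ target - chunk.length := by omega
      by_cases hin : target - (chunk.length + 1) ≤ xs.length
      · rw [if_pos hin, if_pos (by simp; omega)]
        have hdt : target - chunk.length = (target - (chunk.length + 1)) + 1 := by omega
        rw [hdt]
        simp [List.take_succ_cons, List.drop_succ_cons]
      · rw [if_neg hin, if_neg (by simp; omega)]

theorem loopB_eq_chunksF : ∀ (fuel : Nat) (rest : List Int) (n : Nat) (res : List (List Int)),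
    rest.length ≤ fuel →
    M_loopB rest [] (n + 1) res = res ++ chunksF rest n := by
  intro fuel
  induction fuel with
  | zero =>
    intro rest n res hfuel
    have : rest = [] := List.length_eq_zero_iff.mp (by omega)
    subst this
    rw [M_loopB, chunksF, if_neg (by simp only [List.length_nil]; omega), List.append_nil]
  | succ fuel ih =>
    intro rest n res hfuel
    rw [loopB_fill rest [] (n + 1) res (by simp only [List.length_nil]; omega), chunksF]
    simp only [List.length_nil, Nat.sub_zero, List.nil_append]
    by_cases hc : n + 1 ≤ rest.length
    · rw [if_pos hc, if_pos hc]
      rw [ih (rest.drop (n + 1)) (n + 1) (res ++ [rest.take (n + 1)])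
        (by simp only [List.length_drop]; omega)]
      simp
    · rw [if_neg hc, if_neg hc, List.append_nil]

-- ===== VERDICT (by name: the statement is the Claim_ definition above) =====
theorem M_alternates_spec : Claim_equal_M_alternates := by
  intro lista _
  unfold Spec_M_alternates M_alternates M_alternates_alt
  have hA := loopA_eq_chunksF lista (lista.length + 1) 0 0 [] (by omega)
  simp only [Nat.zero_add] at hA
  rw [hA, loopB_eq_chunksF lista.length lista 0 [] (by omega)]
  simp
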